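-- pv_equiv track=rewrite | github.com/NoHeartPen/fast-mikann-api | mikann.py | get_cursor_result
-- ===== SOURCE A (Python) =====
-- def get_cursor_result(analysis_result: list[str], cursor_index: int) -> str | None:
--     """
--     返回光标所在位置的单词的分析结果。
--     Args:
--         analysis_result: 光标所在上下文的所有分析结果
--         cursor_index: 光标所在的上下文的索引
--
--     Returns:
--         光标所在位置的单词的分析结果，如果光标位置不在上下文中，返回 None.
--     """
--     if cursor_index < 0:
--         raise ValueError(
--             f"Cursor index must be a non-negative integer. Given index: {cursor_index}. "
--             f"Analysis results: {analysis_result}"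
--         )
--
--     total_length = sum(len(result[0]) for result in analysis_result)
--     if cursor_index > total_length:
--         # 光标所在的位置索引不可能大于所有分析结果的表层形的长度之和
--         raise ValueError(
--             f"Cursor index is out of range. Given index: {cursor_index}. "
--             f"Analysis results: {analysis_result}"
--         )
--
--     length_before_cursor = 0
--     for result in analysis_result:
--         surface, jishokei = result[0], result[1]
--         length_before_cursor += len(surface)
--         if length_before_cursor >= cursor_index:
--             # TODO = 说明用户的光标正好放在2个句节的分界处
--             # 可以考虑基于难度和词频猜测哪个更有可能是用户想查的单词，
--             # 或者允许按照个人习惯，设置这种情况是返回前还是后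
--             return jishokei
-- ===== SOURCE B (Python) =====
-- def get_cursor_result(analysis_result: list[str], cursor_index: int) -> str | None:
--     """Prefix-sum table + binary search instead of a running-sum scan."""
--     if cursor_index < 0:
--         raise ValueError(
--             f"Cursor index must be a non-negative integer. Given index: {cursor_index}. "
--             f"Analysis results: {analysis_result}"
--         )
--
--     prefix = []
--     running = 0
--     for result in analysis_result:
--         running += len(result[0])
--         prefix.append(running)
--
--     if cursor_index > running:
--         raise ValueError(
--             f"Cursor index is out of range. Given index: {cursor_index}. "
--             f"Analysis results: {analysis_result}"
--         )
--
--     # hand-written bisect_left (this module imports nothing)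
--     lo, hi = 0, len(prefix)
--     while lo < hi:
--         mid = (lo + hi) // 2
--         if prefix[mid] < cursor_index:
--             lo = mid + 1
--         else:
--             hi = mid
--     if lo < len(analysis_result):
--         return analysis_result[lo][1]
--     return None
-- ===== Notes on version B (the rewrite author's own statement) =====
-- stated objective: alternative
-- what changed: Replaces A's single running-sum scan with an early return by a prefix-sum table followed by a hand-written bisect_left binary search and one direct index.
import Mathlib
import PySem

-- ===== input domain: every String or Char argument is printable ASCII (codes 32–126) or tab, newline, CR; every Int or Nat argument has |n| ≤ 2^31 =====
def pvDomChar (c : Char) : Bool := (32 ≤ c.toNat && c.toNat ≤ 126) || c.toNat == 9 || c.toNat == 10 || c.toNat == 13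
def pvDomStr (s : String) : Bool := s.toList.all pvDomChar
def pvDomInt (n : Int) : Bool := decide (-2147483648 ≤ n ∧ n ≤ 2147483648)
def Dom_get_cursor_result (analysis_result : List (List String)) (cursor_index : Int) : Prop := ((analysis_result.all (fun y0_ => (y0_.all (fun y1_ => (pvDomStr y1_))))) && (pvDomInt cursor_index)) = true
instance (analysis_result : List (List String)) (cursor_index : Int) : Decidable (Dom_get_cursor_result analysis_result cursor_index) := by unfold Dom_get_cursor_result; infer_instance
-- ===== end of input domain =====

-- B replaces A's running-sum scan with a prefix-sum table plus binary search (bisect_left); equal wherever A returns.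


-- ===== PORT A =====
-- total_length = sum(len(result[0]) for result in analysis_result); none = IndexError on a missing [0]
def pvSumLensA : List (List String) → Option Int
  | [] => some 0
  | r :: rest =>
    match PySem.List.pyGet? r 0 with
    | none => none
    | some s => (pvSumLensA rest).map (fun t => PySem.Str.len s + t)

-- the for-loop with accumulator length_before_cursor; none = IndexError at the tuple unpack, or fell off the loop (Python None)
def pvLoopA : List (List String) → Int → Int → Option String
  | [], _, _ => none
  | r :: rest, acc, c =>
    match PySem.List.pyGet? r 0, PySem.List.pyGet? r 1 with
    | some surface, some jishokei =>
      let acc' := acc + PySem.Str.len surface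
      if c ≤ acc' then some jishokei else pvLoopA rest acc' c
    | _, _ => none

def get_cursor_result (analysis_result : List (List String)) (cursor_index : Int) : Option String :=
  if cursor_index < 0 then none  -- raise ValueError
  else
    match pvSumLensA analysis_result with
    | none => none  -- IndexError inside the sum
    | some total_length =>
      if cursor_index > total_length then none  -- raise ValueError
      else pvLoopA analysis_result 0 cursor_index

-- ===== PORT B =====
-- the prefix-building loop: returns (prefix, running); none = IndexError on a missing [0]
def pvPrefixB : List (List String) → Int → Option (List Int × Int)
  | [], running => some ([], running)
  | r :: rest, running =>
    match PySem.List.pyGet? r 0 with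
    | none => none
    | some s =>
      let running' := running + PySem.Str.len s
      (pvPrefixB rest running').map (fun p => (running' :: p.1, p.2))

def get_cursor_result_alt (analysis_result : List (List String)) (cursor_index : Int) : Option String :=
  if cursor_index < 0 then none  -- raise ValueError
  else
    match pvPrefixB analysis_result 0 with
    | none => none  -- IndexError while building the prefix table
    | some (pre, running) =>
      if cursor_index > running then none  -- raise ValueError
      else
        let lo := PySem.List.bisectLeft pre cursor_index  -- the hand-written bisect_left loop of Source B
        if lo < analysis_result.length then
          PySem.List.pyGet? (analysis_result.getD lo []) 1
        else none

-- ===== PRECONDITION & SPEC =====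
-- proof-independent mirrors used only to state Pre_
def pvLens (l : List (List String)) : List Int := l.map (fun r => ((r.headD "").toList.length : Int))

def pvAccum : Int → List Int → List Int
  | _, [] => []
  | acc, x :: xs => (acc + x) :: pvAccum (acc + x) xs

-- index of the segment the cursor falls in: first prefix sum ≥ cursor_index
def pvSegIdx (l : List (List String)) (c : Int) : Nat :=
  ((pvAccum 0 (pvLens l)).takeWhile (fun x => decide (x < c))).length

-- Pre_ excludes only inputs on which the Python A raises (ValueError or IndexError), nothing else.
-- Pre_ = exactly the inputs where the Python A returns: cursor in [0, total length],
-- every entry non-empty (the sum reads [0] of all of them), and every entry up to and including the cursor's segment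
-- has both fields (the loop unpacks [0],[1] of each entry it visits).
def Pre_get_cursor_result (analysis_result : List (List String)) (cursor_index : Int) : Prop :=
  0 ≤ cursor_index ∧ (∀ r ∈ analysis_result, r ≠ []) ∧ cursor_index ≤ (pvLens analysis_result).sum ∧
    ∀ r ∈ analysis_result.take (pvSegIdx analysis_result cursor_index + 1), 2 ≤ r.length
instance (analysis_result : List (List String)) (cursor_index : Int) : Decidable (Pre_get_cursor_result analysis_result cursor_index) := by unfold Pre_get_cursor_result; infer_instance

def pvWitness_get_cursor_result : List (List String) × Int := ([["ab", "x"], ["c", "y"]], 3)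

def Spec_get_cursor_result (analysis_result : List (List String)) (cursor_index : Int) (out : Option String) : Prop := out = get_cursor_result_alt analysis_result cursor_index
instance (analysis_result : List (List String)) (cursor_index : Int) (out : Option String) : Decidable (Spec_get_cursor_result analysis_result cursor_index out) := by unfold Spec_get_cursor_result; infer_instance

-- ===== CLAIM (what is proved, stated in full; the proofs are below) =====
def Claim_equal_get_cursor_result : Prop := ∀ (analysis_result : List (List String)) (cursor_index : Int), Dom_get_cursor_result analysis_result cursor_index → Pre_get_cursor_result analysis_result cursor_index → Spec_get_cursor_result analysis_result cursor_index (get_cursor_result analysis_result cursor_index)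


-- ===== LEMMAS AND PROOFS =====

lemma pvLens_nonneg (l : List (List String)) : ∀ x ∈ pvLens l, 0 ≤ x := by
  intro x hx
  simp only [pvLens, List.mem_map] at hx
  obtain ⟨r, _, rfl⟩ := hx
  positivity

lemma pvAccum_pairwise (acc : Int) (xs : List Int) (h : ∀ x ∈ xs, 0 ≤ x) :
    List.Pairwise (fun a b => a ≤ b) (pvAccum acc xs) := by
  induction xs generalizing acc with
  | nil => exact List.Pairwise.nil
  | cons x xs ih =>
    have h0 : ∀ x ∈ xs, (0:Int) ≤ x := fun y hy => h y (List.mem_cons_of_mem _ hy)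
    refine List.Pairwise.cons ?_ (ih (acc + x) h0)
    -- every later prefix sum is ≥ acc + x
    clear ih
    have : ∀ (a : Int) (ys : List Int), (∀ y ∈ ys, 0 ≤ y) → ∀ b ∈ pvAccum a ys, a ≤ b := by
      intro a ys
      induction ys generalizing a with
      | nil => intro _ b hb; simp [pvAccum] at hb
      | cons y ys ih2 =>
        intro hy b hb
        simp only [pvAccum, List.mem_cons] at hb
        rcases hb with rfl | hb
        · have := hy y (List.mem_cons_self ..); omega
        · have := ih2 (a + y) (fun z hz => hy z (List.mem_cons_of_mem _ hz)) b hb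
          have := hy y (List.mem_cons_self ..); omega
    exact this (acc + x) xs h0

-- takeWhile facts
lemma tw_le {α : Type} (p : α → Bool) (xs : List α) : (xs.takeWhile p).length ≤ xs.length :=
  (List.takeWhile_prefix p).length_le

lemma tw_lt {α : Type} (p : α → Bool) (xs : List α) (j : Nat) (hj : j < (xs.takeWhile p).length)
    (hx : j < xs.length) : p xs[j] = true := by
  induction xs generalizing j with
  | nil => simp at hx
  | cons x xs ih =>
    by_cases hp : p x
    · cases j with
      | zero => simpa using hp
      | succ j =>
        simp only [List.takeWhile_cons, hp, if_true, List.length_cons] at hj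
        exact ih j (by simpa using hj) (by simpa using hx)
    · simp [hp] at hj

lemma tw_stop {α : Type} (p : α → Bool) (xs : List α) (h : (xs.takeWhile p).length < xs.length) :
    p (xs[(xs.takeWhile p).length]'h) = false := by
  induction xs with
  | nil => simp at h
  | cons x xs ih =>
    by_cases hp : p x
    · simp only [List.takeWhile_cons, hp, if_true, List.length_cons] at h ⊢
      exact ih (by simpa using h)
    · simp [hp]

-- bisect_left on a nondecreasing list finds the takeWhile(< c) boundary
lemma bisect_eq_tw (xs : List Int) (c : Int) (hs : List.Pairwise (fun a b => a ≤ b) xs) :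
    PySem.List.bisectLeft xs c = (xs.takeWhile (fun x => decide (x < c))).length := by
  obtain ⟨h1, h2, h3⟩ := PySem.List.bisectLeft_spec xs c hs
  set b := PySem.List.bisectLeft xs c with hb
  set t := (xs.takeWhile (fun x => decide (x < c))).length with ht
  rcases lt_trichotomy b t with hlt | heq | hgt
  · have htl : t ≤ xs.length := tw_le _ xs
    have hbx : b < xs.length := lt_of_lt_of_le hlt htl
    have := h3 b hbx le_rfl
    have := tw_lt (fun x => decide (x < c)) xs b hlt hbx
    simp only [decide_eq_true_eq] at this
    omega
  · exact heq
  · have hbl : t < xs.length := lt_of_lt_of_le hgt h1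
    have e1 := h2 t hbl hgt
    have e2 := tw_stop (fun x => decide (x < c)) xs (ht ▸ hbl)
    have e2' : ¬ (xs[t]'hbl < c) := by simpa using e2
    omega

lemma sumA_eq (l : List (List String)) (h : ∀ r ∈ l, r ≠ []) :
    pvSumLensA l = some ((pvLens l).sum) := by
  induction l with
  | nil => rfl
  | cons r rest ih =>
    have hr : r ≠ [] := h r (List.mem_cons_self ..)
    obtain ⟨a, r', rfl⟩ : ∃ a r', r = a :: r' := by cases r with
      | nil => exact absurd rfl hr
      | cons a r' => exact ⟨a, r', rfl⟩
    have := ih (fun x hx => h x (List.mem_cons_of_mem _ hx))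
    simp [pvSumLensA, PySem.List.pyGet?, PySem.List.pyIdx?, this, pvLens, PySem.Str.len_eq]

lemma prefixB_eq (l : List (List String)) (acc : Int) (h : ∀ r ∈ l, r ≠ []) :
    pvPrefixB l acc = some (pvAccum acc (pvLens l), acc + (pvLens l).sum) := by
  induction l generalizing acc with
  | nil => simp [pvPrefixB, pvLens, pvAccum]
  | cons r rest ih =>
    have hr : r ≠ [] := h r (List.mem_cons_self ..)
    obtain ⟨a, r', rfl⟩ : ∃ a r', r = a :: r' := by
      cases r with
      | nil => exact absurd rfl hr
      | cons a r' => exact ⟨a, r', rfl⟩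
    have hg0 : PySem.List.pyGet? (a :: r') (0 : Int) = some a := by
      simp [PySem.List.pyGet?, PySem.List.pyIdx?]
    have ih' := ih (acc + (a.toList.length : Int)) (fun x hx => h x (List.mem_cons_of_mem _ hx))
    simp only [pvPrefixB, hg0, PySem.Str.len_eq, pvLens, List.map_cons, List.headD_cons,
      pvAccum, List.sum_cons]
    simp only [pvLens] at ih'
    rw [ih']
    simp only [Option.map_some, Option.some.injEq, Prod.mk.injEq, true_and]
    ring

-- the loop of A returns the [1]-field of the segment at the takeWhile boundary
lemma loopA_eq (l : List (List String)) (acc c : Int)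
    (hne : ∀ r ∈ l, r ≠ [])
    (hlen : ∀ r ∈ l.take (((pvAccum acc (pvLens l)).takeWhile (fun x => decide (x < c))).length + 1), 2 ≤ r.length) :
    pvLoopA l acc c =
      (if ((pvAccum acc (pvLens l)).takeWhile (fun x => decide (x < c))).length < l.length
       then PySem.List.pyGet? (l.getD (((pvAccum acc (pvLens l)).takeWhile (fun x => decide (x < c))).length) []) 1
       else none) := by
  induction l generalizing acc with
  | nil => simp [pvLoopA, pvLens, pvAccum]
  | cons r rest ih =>
    have hr : r ≠ [] := hne r (List.mem_cons_self ..)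
    obtain ⟨a, r', rfl⟩ : ∃ a r', r = a :: r' := by
      cases r with
      | nil => exact absurd rfl hr
      | cons a r' => exact ⟨a, r', rfl⟩
    simp only [pvLens, List.map_cons, List.headD_cons, pvAccum, List.takeWhile_cons] at hlen ⊢
    have hlen0 : 2 ≤ (a :: r').length := by
      apply hlen
      rw [List.take_succ_cons]
      exact List.mem_cons_self ..
    obtain ⟨b, r'', rfl⟩ : ∃ b r'', r' = b :: r'' := by
      cases r' with
      | nil => simp at hlen0
      | cons b r'' => exact ⟨b, r'', rfl⟩
    have h01 : (0:Int) ≤ (r''.length : Int) + 1 := by positivity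
    have hg0 : PySem.List.pyGet? (a :: b :: r'') (0 : Int) = some a := by
      simp [PySem.List.pyGet?, PySem.List.pyIdx?, h01]
    have hg1 : PySem.List.pyGet? (a :: b :: r'') (1 : Int) = some b := by
      simp [PySem.List.pyGet?, PySem.List.pyIdx?]
    by_cases hstop : (acc + (a.toList.length : Int)) < c
    · -- loop continues to the next segment
      have hd : decide ((acc + (a.toList.length : Int)) < c) = true := decide_eq_true hstop
      simp only [hd, if_true, List.length_cons] at hlen ⊢
      have hA : pvLoopA ((a :: b :: r'') :: rest) acc c
          = pvLoopA rest (acc + (a.toList.length : Int)) c := by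
        simp only [pvLoopA, hg0, hg1, PySem.Str.len_eq]
        rw [if_neg (by omega)]
      rw [hA]
      have ih' := ih (acc + (a.toList.length : Int)) (fun x hx => hne x (List.mem_cons_of_mem _ hx))
        (by
          intro x hx
          apply hlen
          rw [List.take_succ_cons]
          refine List.mem_cons_of_mem _ ?_
          simpa only [pvLens] using hx)
      simp only [pvLens] at ih'
      rw [ih']
      simp only [List.getD_cons_succ, Nat.add_lt_add_iff_right]
    · -- loop stops at this segment
      have hd : decide ((acc + (a.toList.length : Int)) < c) = false := decide_eq_false hstop
      simp only [hd, Bool.false_eq_true, if_false, List.length_nil]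
      rw [if_pos (by simp)]
      simp only [List.getD_cons_zero, pvLoopA, hg0, hg1, PySem.Str.len_eq]
      rw [if_pos (by omega)]

-- ===== VERDICT (by name: the statement is the Claim_ definition above) =====
theorem get_cursor_result_spec : Claim_equal_get_cursor_result := by
  intro l c _ hpre
  obtain ⟨h0, hne, hle, htake⟩ := hpre
  unfold pvSegIdx at htake
  unfold Spec_get_cursor_result get_cursor_result get_cursor_result_alt
  rw [if_neg (not_lt.mpr h0), if_neg (not_lt.mpr h0)]
  simp only [sumA_eq l hne, prefixB_eq l 0 hne, zero_add]
  rw [if_neg (not_lt.mpr hle), if_neg (not_lt.mpr hle)]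
  have hpw : List.Pairwise (fun a b : Int => a ≤ b) (pvAccum 0 (pvLens l)) :=
    pvAccum_pairwise 0 _ (pvLens_nonneg l)
  rw [bisect_eq_tw _ c hpw]
  exact loopA_eq l 0 c hne htake
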